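-- pv_equiv track=rewrite | github.com/egondo/1tdsps | string/caixa_alta.py | substitui_all
-- ===== SOURCE A (Python) =====
-- def substitui_all(frase: str, letras: str) -> str:
--     resp = ""
--     letras_m = letras.upper()
--     for c in frase:
--         if c in letras or c in letras_m:
--             resp = resp + "*"
--         else:
--             resp = resp + c
--     return resp
-- ===== SOURCE B (Python) =====
-- def substitui_all(frase: str, letras: str) -> str:
--     for ch in set(letras) | set(letras.upper()):
--         frase = frase.replace(ch, "*")
--     return frase
-- ===== Notes on version B (the rewrite author's own statement) =====
-- stated objective: faster
-- what changed: B inverts the traversal: instead of scanning frase character by character with membership tests and quadratic string concatenation, it iterates over the distinct letters of letras (and their uppercase forms) and performs one whole-string replace pass per letter; pass order is irrelevant because every replacement target becomes '*'.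
import Mathlib
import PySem

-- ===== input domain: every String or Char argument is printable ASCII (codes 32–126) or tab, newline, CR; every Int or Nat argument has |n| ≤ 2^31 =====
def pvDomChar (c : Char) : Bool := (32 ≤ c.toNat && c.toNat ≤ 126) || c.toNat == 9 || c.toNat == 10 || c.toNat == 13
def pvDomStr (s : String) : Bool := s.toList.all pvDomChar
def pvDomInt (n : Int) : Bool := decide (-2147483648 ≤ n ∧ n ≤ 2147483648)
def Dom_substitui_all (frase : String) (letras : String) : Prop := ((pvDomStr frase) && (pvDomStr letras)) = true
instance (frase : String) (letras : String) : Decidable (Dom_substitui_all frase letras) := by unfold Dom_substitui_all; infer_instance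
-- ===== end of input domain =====

-- B inverts the traversal: one whole-string replace pass per distinct letter
-- (case-insensitive via letras.upper()) instead of A's per-character scan of frase.

-- ===== PORT A =====
def substitui_all (frase : String) (letras : String) : String :=
  let letras_m := PySem.Chars.upper letras.toList
  String.ofList (frase.toList.foldl (fun resp c =>
    if PySem.Chars.isIn [c] letras.toList || PySem.Chars.isIn [c] letras_m then
      resp ++ ['*']
    else
      resp ++ [c]) [])

-- ===== PORT B =====
def substitui_all_alt (frase : String) (letras : String) : String :=
  let chars : PySem.Set Char :=
    PySem.Set.union (PySem.Set.ofList letras.toList) (PySem.Chars.upper letras.toList)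
  String.ofList (chars.foldl (fun s ch => PySem.Chars.replace s [ch] ['*']) frase.toList)

-- ===== PRECONDITION & SPEC =====
def Spec_substitui_all (frase : String) (letras : String) (out : String) : Prop := out = substitui_all_alt frase letras
instance (frase : String) (letras : String) (out : String) : Decidable (Spec_substitui_all frase letras out) := by unfold Spec_substitui_all; infer_instance

-- ===== CLAIM (what is proved, stated in full; the proofs are below) =====
def Claim_equal_substitui_all : Prop := ∀ (frase : String) (letras : String), Dom_substitui_all frase letras → Spec_substitui_all frase letras (substitui_all frase letras)

-- ===== LEMMAS AND PROOFS =====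

-- a single char is in a string iff it is a member of its char list
theorem isIn_singleton_eq (c : Char) (l : List Char) :
    PySem.Chars.isIn [c] l = decide (c ∈ l) := by
  by_cases h : c ∈ l
  · simp [h, PySem.Chars.isIn_iff_infix, List.singleton_infix_iff]
  · simp [h]
    rw [PySem.Chars.isIn_eq_false_iff, List.singleton_infix_iff]
    exact h

-- single-character replace.go is a map over the remaining input
theorem replace_go_singleton (c : Char) (l : List Char) (fuel : Nat) (acc : List Char)
    (h : l.length ≤ fuel) :
    PySem.Chars.replace.go [c] ['*'] fuel l acc =
      acc.reverse ++ l.map (fun x => if x = c then '*' else x) := by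
  induction l generalizing fuel acc with
  | nil => cases fuel <;> simp [PySem.Chars.replace.go]
  | cons a t ih =>
    cases fuel with
    | zero => simp at h
    | succ n =>
      simp only [PySem.Chars.replace.go]
      by_cases hac : a = c
      · subst hac
        simp only [List.isPrefixOf, beq_self_eq_true, Bool.and_true, if_pos]
        simp only [List.length_cons, List.length_nil, Nat.zero_add, List.drop_succ_cons,
          List.drop_zero, List.reverse_cons, List.reverse_nil, List.nil_append, List.cons_append]
        rw [ih n ('*' :: acc) (Nat.le_of_succ_le_succ h)]
        simp
      · have : ([c].isPrefixOf (a :: t)) = false := by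
          simp [List.isPrefixOf]; exact fun hh => absurd hh.symm hac
        rw [this]
        simp only [Bool.false_eq_true, if_false]
        rw [ih n (a :: acc) (Nat.le_of_succ_le_succ h)]
        simp [hac]

-- single-character replace is a map
theorem replace_singleton (c : Char) (l : List Char) :
    PySem.Chars.replace l [c] ['*'] = l.map (fun x => if x = c then '*' else x) := by
  simp [PySem.Chars.replace, replace_go_singleton c l l.length [] le_rfl]

-- folding single-character replaces over a list of letters marks exactly the members
theorem foldl_replace_eq_map (L : List Char) (s : List Char) :
    L.foldl (fun s ch => PySem.Chars.replace s [ch] ['*']) s =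
      s.map (fun x => if x ∈ L then '*' else x) := by
  induction L generalizing s with
  | nil => simp
  | cons c L ih =>
    simp only [List.foldl_cons]
    rw [replace_singleton, ih, List.map_map]
    apply List.map_congr_left
    intro x _
    by_cases hx : x = c <;> simp [hx, Function.comp]

-- A's accumulator fold is a map with the combined membership test
theorem a_fold_eq_map (fs l : List Char) (acc : List Char) :
    fs.foldl (fun resp c =>
      if PySem.Chars.isIn [c] l || PySem.Chars.isIn [c] (PySem.Chars.upper l) then
        resp ++ ['*'] else resp ++ [c]) acc =
    acc ++ fs.map (fun c =>
      if c ∈ PySem.Set.union (PySem.Set.ofList l) (PySem.Chars.upper l) then '*' else c) := by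
  induction fs generalizing acc with
  | nil => simp
  | cons c fs ih =>
    simp only [List.foldl_cons, List.map_cons]
    rw [ih]
    have : (PySem.Chars.isIn [c] l || PySem.Chars.isIn [c] (PySem.Chars.upper l)) =
        decide (c ∈ PySem.Set.union (PySem.Set.ofList l) (PySem.Chars.upper l)) := by
      simp [pysem, isIn_singleton_eq]
    rw [this]
    by_cases h : c ∈ PySem.Set.union (PySem.Set.ofList l) (PySem.Chars.upper l) <;> simp [h]

-- ===== VERDICT (by name: the statement is the Claim_ definition above) =====
theorem substitui_all_spec : Claim_equal_substitui_all := by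
  intro frase letras _
  unfold Spec_substitui_all substitui_all substitui_all_alt
  simp only [a_fold_eq_map, foldl_replace_eq_map, List.nil_append]
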